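-- pv_equiv track=rewrite | github.com/Vsevalot/railroads | kniga_2_reader.py | get_operation_codes
-- ===== SOURCE A (Python) =====
-- from typing import List, Dict
--
-- def get_operation_codes(operations_cell: str) -> List[str]:
--     """
--     Reads an excel operations cell and return list of operations codes from the r_transportation_operations table
--     :param operations_cell: Operations cell from excel worksheet ("О 1,3,4,6,8,8н, 9,10,10н")
--     :return: List of operations
--     """
--     operations = []
--     operation = ''
--     for char in operations_cell:
--         if char != ' ' and char != ',':
--             operation += char
--         elif operation != '':
--             if operation != "nan":
--                 operations.append(operation)
--             operation = ''
--     if operation != '' and operation != "nan":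
--         operations.append(operation)
--     return operations
-- ===== SOURCE B (Python) =====
-- def get_operation_codes(operations_cell: str):
--     """
--     Reads an excel operations cell and return list of operations codes from the r_transportation_operations table
--     """
--     tokens = operations_cell.replace(',', ' ').split(' ')
--     return [t for t in tokens if t and t != 'nan']
-- ===== Notes on version B (the rewrite author's own statement) =====
-- stated objective: idiomatic
-- what changed: Replaced the character-by-character accumulator state machine with a split-then-filter pipeline: normalise commas to spaces, split on single spaces, and keep the non-empty non-placeholder tokens.
import Mathlib
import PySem

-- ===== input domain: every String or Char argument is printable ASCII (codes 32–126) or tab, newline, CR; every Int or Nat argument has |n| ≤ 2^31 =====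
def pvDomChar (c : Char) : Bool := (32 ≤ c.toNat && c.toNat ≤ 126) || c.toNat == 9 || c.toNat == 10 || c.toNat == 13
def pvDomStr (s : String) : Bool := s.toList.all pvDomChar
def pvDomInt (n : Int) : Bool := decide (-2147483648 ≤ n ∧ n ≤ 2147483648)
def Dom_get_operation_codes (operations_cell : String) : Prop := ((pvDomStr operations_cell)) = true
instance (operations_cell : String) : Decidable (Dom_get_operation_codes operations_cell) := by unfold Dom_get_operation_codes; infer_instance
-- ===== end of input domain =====

-- B replaces A's character-by-character accumulator state machine with an idiomatic
-- normalise-commas / split-on-space / filter pipeline; same cost, proved equal on all inputs.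


-- ===== PORT A =====
-- one loop iteration of A: non-delimiter chars extend `operation`; on a delimiter a
-- non-empty, non-"nan" `operation` is flushed to the result list
def pvAStep (st : List String × String) (char : Char) : List String × String :=
  if char ≠ ' ' ∧ char ≠ ',' then (st.1, st.2.push char)
  else if st.2 ≠ "" then ((if st.2 ≠ "nan" then st.1 ++ [st.2] else st.1), "")
  else st

def get_operation_codes (operations_cell : String) : List String :=
  let r := operations_cell.toList.foldl pvAStep ([], "")
  if r.2 ≠ "" ∧ r.2 ≠ "nan" then r.1 ++ [r.2] else r.1

-- ===== PORT B =====
-- Source B: tokens = operations_cell.replace(',', ' ').split(' ');  [t for t in tokens if t and t != 'nan']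
-- replace(',', ' ') on single chars = pointwise map; str.split(' ') = List.splitOn ' ' (keeps empty pieces)
def get_operation_codes_alt (operations_cell : String) : List String :=
  let tokens := ((operations_cell.toList.map (fun c => if c = ',' then ' ' else c)).splitOn ' ').map String.ofList
  tokens.filter (fun t => t != "" && t != "nan")

-- ===== PRECONDITION & SPEC =====
def Spec_get_operation_codes (operations_cell : String) (out : List String) : Prop := out = get_operation_codes_alt operations_cell
instance (operations_cell : String) (out : List String) : Decidable (Spec_get_operation_codes operations_cell out) := by unfold Spec_get_operation_codes; infer_instance

-- ===== CLAIM (what is proved, stated in full; the proofs are below) =====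
def Claim_equal_get_operation_codes : Prop := ∀ (operations_cell : String), Dom_get_operation_codes operations_cell → Spec_get_operation_codes operations_cell (get_operation_codes operations_cell)

-- ===== LEMMAS AND PROOFS =====

theorem pvModifyHeadId {α : Type} (l : List α) : List.modifyHead (fun x => x) l = l := by
  cases l <;> rfl

theorem pvSplitOn_cons (c : Char) (l : List Char) :
    List.splitOn ' ' (c :: l) = if (c == ' ') = true then [] :: List.splitOn ' ' l
      else List.modifyHead (List.cons c) (List.splitOn ' ' l) :=
  List.splitOnP_cons _ c l

-- the flush performed after A's loop
def pvFlush (r : List String × String) : List String :=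
  if r.2 ≠ "" ∧ r.2 ≠ "nan" then r.1 ++ [r.2] else r.1

-- loop invariant: running A's loop from state (res, op) and flushing equals res ++ the
-- filtered tokens of the rest, with op prepended onto the first token
theorem pvKey : ∀ (cs : List Char) (res : List String) (op : String),
    pvFlush (cs.foldl pvAStep (res, op))
      = res ++ ((((cs.map (fun c => if c = ',' then ' ' else c)).splitOn ' ').modifyHead
            (op.toList ++ ·)).map String.ofList).filter (fun t => t != "" && t != "nan") := by
  intro cs
  induction cs with
  | nil =>
    intro res op
    simp only [List.foldl_nil, List.map_nil, List.splitOn_nil, List.modifyHead_cons,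
      List.append_nil, List.map_cons, List.map_nil, String.ofList_toList, pvFlush,
      List.filter_cons, List.filter_nil]
    by_cases h1 : op = ""
    · subst h1; simp
    · by_cases h2 : op = "nan"
      · subst h2; simp
      · simp [h1, h2]
  | cons c cs ih =>
    intro res op
    by_cases hd : c ≠ ' ' ∧ c ≠ ','
    · -- non-delimiter: extend op
      have hc : (if c = ',' then ' ' else c) = c := by simp [hd.2]
      rw [List.foldl_cons]
      have hstep : pvAStep (res, op) c = (res, op.push c) := by simp [pvAStep, hd]
      rw [hstep, ih res (op.push c), List.map_cons, hc]
      have hsp : (c :: (cs.map (fun c => if c = ',' then ' ' else c))).splitOn ' '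
          = List.modifyHead (List.cons c) ((cs.map (fun c => if c = ',' then ' ' else c)).splitOn ' ') := by
        rw [pvSplitOn_cons]
        simp [hd.1]
      rw [hsp, List.modifyHead_modifyHead]
      have hfun : ((fun x => op.toList ++ x) ∘ List.cons c) = (fun x => (op.push c).toList ++ x) := by
        funext l; simp [String.toList_push]
      rw [hfun]
    · -- delimiter: flush op
      have hc : (if c = ',' then ' ' else c) = ' ' := by
        rcases not_and_or.mp hd with h | h
        · simp at h; simp [h]
        · simp at h; simp [h]
      rw [List.foldl_cons, List.map_cons, hc]
      have hsp : (' ' :: (cs.map (fun c => if c = ',' then ' ' else c))).splitOn ' '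
          = [] :: ((cs.map (fun c => if c = ',' then ' ' else c)).splitOn ' ') := by
        rw [pvSplitOn_cons]
        simp
      rw [hsp]
      by_cases h1 : op = ""
      · subst h1
        have hstep : pvAStep (res, "") c = (res, "") := by simp [pvAStep, hd]
        rw [hstep, ih res ""]
        simp [pvModifyHeadId]
      · have hstep : pvAStep (res, op) c
            = ((if op ≠ "nan" then res ++ [op] else res), "") := by
          simp [pvAStep, hd, h1]
        rw [hstep, ih _ ""]
        simp only [List.modifyHead_cons, List.map_cons,
          List.filter_cons, String.toList_empty, List.nil_append, pvModifyHeadId]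
        by_cases h2 : op = "nan"
        · subst h2; simp
        · simp [h1, h2, List.append_assoc]

-- ===== VERDICT (by name: the statement is the Claim_ definition above) =====
theorem get_operation_codes_spec : Claim_equal_get_operation_codes := by
  intro s _
  show get_operation_codes s = get_operation_codes_alt s
  have h := pvKey s.toList [] ""
  simp only [String.toList_empty, List.nil_append, pvModifyHeadId] at h
  simpa [get_operation_codes, get_operation_codes_alt, pvFlush] using h
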